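-- pv_equiv track=rewrite | github.com/luisamueller0/BachelorProject | backend/database/assignEuropeanRegionExhibition.py | determine_region
-- ===== SOURCE A (Python) =====
-- def determine_region(country_code):
--     europeanRegions = {
--         "North Europe": ["DK", "EE", "FI", "IE", "LV", "LT", "NO", "SE", "GB"],
--         "Eastern Europe": ["BY", "BG", "CZ", "HU", "PL", "MD", "RO", "RU", "SK", "UA"],
--         "Southern Europe": ["BA", "HR", "GI", "GR", "IT", "ME", "PT", "RS", "SI", "ES"],
--      "Western Europe": ["AT", "BE", "FR", "DE", "LU", "NL", "CH"],
--      "Others": ["ID", "US", "AU", "CA", "GE", "DZ", "MX", "AZ", "EE", "AR", "UY", "CU", "TN", "EG", "TR", "VI", "DO",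
--            "JP", "MQ", "IN", "MU", "CL", "ZA", "NZ", "KH", "VE", "GT", "SV", "PY", "LK", "EC", "BR", "SG", "BL",
--            "PE", "TH", "PF", "AM", "IL", "MC", "CN", "UZ", "KZ", "MA", "BO", "VN", "NA", "JO", "IR", "JM", "SA"]
--     }
--
--     """     "GB", "ID", "UA", "CH", "RU", "NL", "DE", "BY", "IT", "LT", "US", "HU", "FR", "AU", "BE", "CZ", "AT", "NO",
--     "GR", "SE", "PL", "LV", "FI", "ES", "MD", "CA", "BG", "GE", "DZ", "MX", "AZ", "RO", "EE", "DK", "AR", "UY",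
--     "CU", "PT", "HR", "SI", "TN", "EG", "SK", "TR", "VI", "RS", "IE", "DO", "JP", "MQ", "IN", "MU", "ME", "CL",
--     "ZA", "NZ", "KH", "LU", "GI", "VE", "GT", "SV", "PY", "LK", "BA", "EC", "BR", "SG", "BL", "PE", "TH", "PF",
--     "AM", "IL", "MC", "CN", "UZ", "KZ", "MA", "BO", "VN", "NA", "JO", "IR", "JM", "SA"
--
--     europeanRegions = {
--         "North Europe": ["DK", "EE", "FI", "IS", "IE", "LV", "LT", "NO", "SE", "GB"],
--         "Eastern Europe": ["AZ", "BY", "BG", "CZ", "HU", "MD", "PL", "RO", "RU", "SK", "UA", "AM", "GE"],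
--         "Southern Europe": ["BA", "HR", "GI", "GR", "IT", "ME", "PT", "RS", "SI", "ES", "AL", "AD", "MT", "MK", "SM"],
--         "Western Europe": ["AT", "BE", "FR", "DE", "LU", "MC", "NL", "CH", "LI"],
--         "Others": [
--             "US", "AU", "GE", "MX", "AM", "IL", "CL", "AR", "CA", "DO", "PE", "JP", "TR",
--             "BR", "ZA", "NZ", "VE", "GT", "UY", "SV", "PY", "IN", "PF", "KZ", "UZ", "VN",
--             "NA", "JO", "IR", "KH", "JM", "SA", "DZ", "CN", "EG", "VI", "ID", "CU", "TN",
--             "MQ", "MU", "LK", "EC", "SG", "BL", "TH", "BO"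
--         ]  """
--
--
--     for region, countries in europeanRegions.items():
--         if country_code in countries:
--             return region
--     return '\\N'  # Return null if no region matches
-- ===== SOURCE B (Python) =====
-- # Sorted (code, region) table + hand-written binary search instead of scanning region lists.
-- _TABLE = [
--     ('AM', 'Others'), ('AR', 'Others'), ('AT', 'Western Europe'), ('AU', 'Others'), ('AZ', 'Others'), ('BA', 'Southern Europe'),
--     ('BE', 'Western Europe'), ('BG', 'Eastern Europe'), ('BL', 'Others'), ('BO', 'Others'), ('BR', 'Others'), ('BY', 'Eastern Europe'),
--     ('CA', 'Others'), ('CH', 'Western Europe'), ('CL', 'Others'), ('CN', 'Others'), ('CU', 'Others'), ('CZ', 'Eastern Europe'),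
--     ('DE', 'Western Europe'), ('DK', 'North Europe'), ('DO', 'Others'), ('DZ', 'Others'), ('EC', 'Others'), ('EE', 'North Europe'),
--     ('EG', 'Others'), ('ES', 'Southern Europe'), ('FI', 'North Europe'), ('FR', 'Western Europe'), ('GB', 'North Europe'), ('GE', 'Others'),
--     ('GI', 'Southern Europe'), ('GR', 'Southern Europe'), ('GT', 'Others'), ('HR', 'Southern Europe'), ('HU', 'Eastern Europe'), ('ID', 'Others'),
--     ('IE', 'North Europe'), ('IL', 'Others'), ('IN', 'Others'), ('IR', 'Others'), ('IT', 'Southern Europe'), ('JM', 'Others'),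
--     ('JO', 'Others'), ('JP', 'Others'), ('KH', 'Others'), ('KZ', 'Others'), ('LK', 'Others'), ('LT', 'North Europe'),
--     ('LU', 'Western Europe'), ('LV', 'North Europe'), ('MA', 'Others'), ('MC', 'Others'), ('MD', 'Eastern Europe'), ('ME', 'Southern Europe'),
--     ('MQ', 'Others'), ('MU', 'Others'), ('MX', 'Others'), ('NA', 'Others'), ('NL', 'Western Europe'), ('NO', 'North Europe'),
--     ('NZ', 'Others'), ('PE', 'Others'), ('PF', 'Others'), ('PL', 'Eastern Europe'), ('PT', 'Southern Europe'), ('PY', 'Others'),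
--     ('RO', 'Eastern Europe'), ('RS', 'Southern Europe'), ('RU', 'Eastern Europe'), ('SA', 'Others'), ('SE', 'North Europe'), ('SG', 'Others'),
--     ('SI', 'Southern Europe'), ('SK', 'Eastern Europe'), ('SV', 'Others'), ('TH', 'Others'), ('TN', 'Others'), ('TR', 'Others'),
--     ('UA', 'Eastern Europe'), ('US', 'Others'), ('UY', 'Others'), ('UZ', 'Others'), ('VE', 'Others'), ('VI', 'Others'),
--     ('VN', 'Others'), ('ZA', 'Others'),
-- ]
--
--
-- def determine_region(country_code):
--     lo, hi = 0, len(_TABLE)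
--     while lo < hi:
--         mid = (lo + hi) // 2
--         code, region = _TABLE[mid]
--         if code < country_code:
--             lo = mid + 1
--         elif country_code < code:
--             hi = mid
--         else:
--             return region
--     return '\\N'
-- ===== Notes on version B (the rewrite author's own statement) =====
-- stated objective: alternative
-- what changed: Replaces A's linear scan over the region code lists with a precomputed code-sorted (code, region) table searched by a hand-written binary search (lo/hi loop), returning '\N' when the search empties.
import Mathlib
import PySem

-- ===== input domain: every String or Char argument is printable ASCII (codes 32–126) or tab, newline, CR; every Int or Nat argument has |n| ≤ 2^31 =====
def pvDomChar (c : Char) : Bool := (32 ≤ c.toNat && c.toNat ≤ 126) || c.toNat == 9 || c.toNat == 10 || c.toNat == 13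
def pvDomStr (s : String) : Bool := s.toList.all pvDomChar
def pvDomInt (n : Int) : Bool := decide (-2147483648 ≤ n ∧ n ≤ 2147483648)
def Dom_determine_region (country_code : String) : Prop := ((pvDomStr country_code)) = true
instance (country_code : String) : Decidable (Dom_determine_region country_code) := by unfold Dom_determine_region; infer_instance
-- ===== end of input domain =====

-- B replaces A's scan over region lists by a sorted (code, region) table and a hand-written
-- binary search; same return value everywhere (alternative algorithm, no speed claim).

set_option maxRecDepth 100000


-- ===== PORT A =====
-- the dict literal A writes out (insertion order preserved)
def europeanRegions : List (String × List String) := [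
  ("North Europe", ["DK", "EE", "FI", "IE", "LV", "LT", "NO", "SE", "GB"]),
  ("Eastern Europe", ["BY", "BG", "CZ", "HU", "PL", "MD", "RO", "RU", "SK", "UA"]),
  ("Southern Europe", ["BA", "HR", "GI", "GR", "IT", "ME", "PT", "RS", "SI", "ES"]),
  ("Western Europe", ["AT", "BE", "FR", "DE", "LU", "NL", "CH"]),
  ("Others", ["ID", "US", "AU", "CA", "GE", "DZ", "MX", "AZ", "EE", "AR", "UY", "CU", "TN", "EG", "TR", "VI", "DO",
    "JP", "MQ", "IN", "MU", "CL", "ZA", "NZ", "KH", "VE", "GT", "SV", "PY", "LK", "EC", "BR", "SG", "BL",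
    "PE", "TH", "PF", "AM", "IL", "MC", "CN", "UZ", "KZ", "MA", "BO", "VN", "NA", "JO", "IR", "JM", "SA"])]

-- 'for region, countries in europeanRegions.items(): if country_code in countries: return region'
def scanRegions (country_code : String) : List (String × List String) → String
  | [] => "\\N"
  | (region, countries) :: rest =>
      if countries.contains country_code then region else scanRegions country_code rest

def determine_region (country_code : String) : String :=
  scanRegions country_code europeanRegions

-- ===== PORT B =====
-- Source B's _TABLE: the (code, region) pairs sorted by code
def sortedTable : List (String × String) := [
  ("AM", "Others"), ("AR", "Others"), ("AT", "Western Europe"), ("AU", "Others"),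
  ("AZ", "Others"), ("BA", "Southern Europe"), ("BE", "Western Europe"), ("BG", "Eastern Europe"),
  ("BL", "Others"), ("BO", "Others"), ("BR", "Others"), ("BY", "Eastern Europe"),
  ("CA", "Others"), ("CH", "Western Europe"), ("CL", "Others"), ("CN", "Others"),
  ("CU", "Others"), ("CZ", "Eastern Europe"), ("DE", "Western Europe"), ("DK", "North Europe"),
  ("DO", "Others"), ("DZ", "Others"), ("EC", "Others"), ("EE", "North Europe"),
  ("EG", "Others"), ("ES", "Southern Europe"), ("FI", "North Europe"), ("FR", "Western Europe"),
  ("GB", "North Europe"), ("GE", "Others"), ("GI", "Southern Europe"), ("GR", "Southern Europe"),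
  ("GT", "Others"), ("HR", "Southern Europe"), ("HU", "Eastern Europe"), ("ID", "Others"),
  ("IE", "North Europe"), ("IL", "Others"), ("IN", "Others"), ("IR", "Others"),
  ("IT", "Southern Europe"), ("JM", "Others"), ("JO", "Others"), ("JP", "Others"),
  ("KH", "Others"), ("KZ", "Others"), ("LK", "Others"), ("LT", "North Europe"),
  ("LU", "Western Europe"), ("LV", "North Europe"), ("MA", "Others"), ("MC", "Others"),
  ("MD", "Eastern Europe"), ("ME", "Southern Europe"), ("MQ", "Others"), ("MU", "Others"),
  ("MX", "Others"), ("NA", "Others"), ("NL", "Western Europe"), ("NO", "North Europe"),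
  ("NZ", "Others"), ("PE", "Others"), ("PF", "Others"), ("PL", "Eastern Europe"),
  ("PT", "Southern Europe"), ("PY", "Others"), ("RO", "Eastern Europe"), ("RS", "Southern Europe"),
  ("RU", "Eastern Europe"), ("SA", "Others"), ("SE", "North Europe"), ("SG", "Others"),
  ("SI", "Southern Europe"), ("SK", "Eastern Europe"), ("SV", "Others"), ("TH", "Others"),
  ("TN", "Others"), ("TR", "Others"), ("UA", "Eastern Europe"), ("US", "Others"),
  ("UY", "Others"), ("UZ", "Others"), ("VE", "Others"), ("VI", "Others"),
  ("VN", "Others"), ("ZA", "Others")]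

-- the 'while lo < hi' binary-search loop of Source B, step for step
def bsearch (t : List (String × String)) (country_code : String) (lo hi : Nat) : String :=
  if _h : lo < hi then
    let mid := (lo + hi) / 2   -- (lo+hi)//2 on nonnegative ints = Nat division: exact
    match t[mid]? with
    | none => "\\N"   -- unreachable when hi ≤ t.length (Python would raise IndexError)
    | some (code, region) =>
      -- Python's '<' on str is code-point lexicographic = '<' on .toList (PYSEM.md: str COMPARISON)
      if code.toList < country_code.toList then bsearch t country_code (mid + 1) hi
      else if country_code.toList < code.toList then bsearch t country_code lo mid
      else region
  else "\\N"
termination_by hi - lo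
decreasing_by all_goals omega

def determine_region_alt (country_code : String) : String :=
  bsearch sortedTable country_code 0 sortedTable.length

-- ===== PRECONDITION & SPEC =====
def Spec_determine_region (country_code : String) (out : String) : Prop := out = determine_region_alt country_code
instance (country_code : String) (out : String) : Decidable (Spec_determine_region country_code out) := by unfold Spec_determine_region; infer_instance

-- ===== CLAIM =====
def Claim_equal_determine_region : Prop := ∀ (country_code : String), Dom_determine_region country_code → Spec_determine_region country_code (determine_region country_code)

-- ===== LEMMAS AND PROOFS =====

-- first-match association lookup, the common denominator of both sides
def assoc? (c : String) : List (String × String) → Option String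
  | [] => none
  | (k, v) :: rest => if k = c then some v else assoc? c rest

lemma assoc_none_of_forall (c : String) (l : List (String × String))
    (h : ∀ p ∈ l, p.1 ≠ c) : assoc? c l = none := by
  induction l with
  | nil => rfl
  | cons p rest ih =>
      simp only [assoc?]
      rw [if_neg (h p (List.mem_cons_self ..)), ih (fun q hq => h q (List.mem_cons_of_mem _ hq))]

lemma mem_of_assoc_some (c v : String) (l : List (String × String))
    (h : assoc? c l = some v) : (c, v) ∈ l := by
  induction l with
  | nil => simp [assoc?] at h
  | cons p rest ih =>
      simp only [assoc?] at h
      split at h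
      · rename_i he; obtain ⟨k, w⟩ := p; cases h; cases he; simp
      · exact List.mem_cons_of_mem _ (ih h)

-- two association lists with the same lookup graph agree on every key
lemma assoc_ext (l₁ l₂ : List (String × String))
    (h₂ : ∀ p ∈ l₂, assoc? p.1 l₁ = some p.2)
    (h₁ : ∀ p ∈ l₁, (assoc? p.1 l₂).isSome = true) :
    ∀ c, assoc? c l₁ = assoc? c l₂ := by
  intro c
  cases h : assoc? c l₂ with
  | some v => exact h₂ (c, v) (mem_of_assoc_some c v l₂ h)
  | none =>
      cases h' : assoc? c l₁ with
      | none => rfl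
      | some v =>
          have := h₁ (c, v) (mem_of_assoc_some c v l₁ h')
          simp only [h] at this
          simp at this

-- A's scan equals first-match lookup in the flattened (code, region) list
lemma scan_eq_assoc (c : String) (rs : List (String × List String)) :
    scanRegions c rs
      = (assoc? c (rs.flatMap (fun rc => rc.2.map (fun k => (k, rc.1))))).getD "\\N" := by
  induction rs with
  | nil => rfl
  | cons p rest ih =>
      obtain ⟨r, cs⟩ := p
      simp only [scanRegions, List.flatMap_cons]
      have hmap : ∀ (cs : List String),
          assoc? c (cs.map (fun k => (k, r)) ++ rest.flatMap (fun rc => rc.2.map (fun k => (k, rc.1))))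
            = if cs.contains c then some r
              else assoc? c (rest.flatMap (fun rc => rc.2.map (fun k => (k, rc.1)))) := by
        intro cs
        induction cs with
        | nil => simp
        | cons x xs ihx =>
            simp only [List.map_cons, List.cons_append, assoc?, ihx, List.contains_cons]
            by_cases hx : x = c
            · simp [hx]
            · have : (c == x) = false := by simp [Ne.symm hx]
              simp [hx, this]
      rw [hmap]
      split
      · rfl
      · exact ih

-- with strictly sorted keys, a member's value is the lookup result
lemma assoc_of_sorted (t : List (String × String))
    (hs : t.Pairwise (fun a b => a.1.toList < b.1.toList)) (k v : String)
    (h : (k, v) ∈ t) : assoc? k t = some v := by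
  induction t with
  | nil => simp at h
  | cons p rest ih =>
      rcases List.mem_cons.1 h with h' | h'
      · subst h'; simp [assoc?]
      · have hk : p.1.toList < k.toList := (List.pairwise_cons.1 hs).1 (k, v) h'
        simp only [assoc?]
        rw [if_neg (fun e => absurd (congrArg String.toList e) (ne_of_lt hk)),
          ih (List.pairwise_cons.1 hs).2 h']

-- strict key-sortedness, stated positionally
lemma sorted_key_lt (t : List (String × String))
    (hs : t.Pairwise (fun a b => a.1.toList < b.1.toList))
    {i j : Nat} (hij : i < j) (hj : j < t.length) :
    (t[i]'(Nat.lt_trans hij hj)).1.toList < (t[j]'hj).1.toList :=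
  (List.pairwise_iff_getElem.1 hs) i j (Nat.lt_trans hij hj) hj hij

-- binary-search correctness on a sorted table
lemma bsearch_eq (t : List (String × String)) (c : String)
    (hs : t.Pairwise (fun a b => a.1.toList < b.1.toList)) :
    ∀ n lo hi, hi - lo ≤ n → hi ≤ t.length →
      (∀ i (h : i < t.length), i < lo → (t[i]'h).1.toList < c.toList) →
      (∀ i (h : i < t.length), hi ≤ i → c.toList < (t[i]'h).1.toList) →
      bsearch t c lo hi = (assoc? c t).getD "\\N" := by
  intro n
  induction n with
  | zero =>
      intro lo hi hn hhi hlo' hhi'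
      rw [bsearch]
      have hle : hi ≤ lo := by omega
      rw [dif_neg (by omega)]
      rw [assoc_none_of_forall c t ?_]
      · rfl
      · intro p hp
        obtain ⟨i, hi', rfl⟩ := List.mem_iff_getElem.1 hp
        rcases Nat.lt_or_ge i lo with h' | h'
        · exact fun e => absurd (congrArg String.toList e) (ne_of_lt (hlo' i hi' h'))
        · exact fun e => absurd (congrArg String.toList e).symm (ne_of_lt (hhi' i hi' (by omega)))
  | succ m ih =>
      intro lo hi hn hhi hlo' hhi'
      rw [bsearch]
      by_cases hlt : lo < hi
      · rw [dif_pos hlt]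
        have hmidlt : (lo + hi) / 2 < t.length := by omega
        rcases hteq : t[(lo + hi) / 2]'hmidlt with ⟨code, region⟩
        have hget : t[(lo + hi) / 2]? = some (code, region) := by
          rw [List.getElem?_eq_getElem hmidlt, hteq]
        simp only [hget]
        by_cases h1 : code.toList < c.toList
        · rw [if_pos h1]
          refine ih ((lo + hi) / 2 + 1) hi (by omega) hhi ?_ hhi'
          intro i h hi'
          rcases Nat.lt_or_ge i ((lo + hi) / 2) with h' | h'
          · exact lt_trans (by simpa [hteq] using sorted_key_lt t hs h' hmidlt) h1
          · have : i = (lo + hi) / 2 := by omega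
            subst this
            simpa [hteq] using h1
        · rw [if_neg h1]
          by_cases h2 : c.toList < code.toList
          · rw [if_pos h2]
            refine ih lo ((lo + hi) / 2) (by omega) (by omega) hlo' ?_
            intro i h hi'
            rcases Nat.lt_or_ge ((lo + hi) / 2) i with h' | h'
            · exact lt_trans h2 (by simpa [hteq] using sorted_key_lt t hs h' h)
            · have : i = (lo + hi) / 2 := by omega
              subst this
              simpa [hteq] using h2
          · rw [if_neg h2]
            have hcode : code = c :=
              String.toList_inj.mp (le_antisymm (le_of_not_gt h2) (le_of_not_gt h1))
            subst hcode
            have hmem : (code, region) ∈ t := by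
              rw [← hteq]; exact List.getElem_mem hmidlt
            rw [assoc_of_sorted t hs code region hmem]
            rfl
      · rw [dif_neg hlt]
        rw [assoc_none_of_forall c t ?_]
        · rfl
        · intro p hp
          obtain ⟨i, hi', rfl⟩ := List.mem_iff_getElem.1 hp
          rcases Nat.lt_or_ge i lo with h' | h'
          · exact fun e => absurd (congrArg String.toList e) (ne_of_lt (hlo' i hi' h'))
          · exact fun e => absurd (congrArg String.toList e).symm (ne_of_lt (hhi' i hi' (by omega)))

-- ===== VERDICT =====
theorem determine_region_spec : Claim_equal_determine_region := by
  intro c _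
  show determine_region c = determine_region_alt c
  rw [determine_region, determine_region_alt, scan_eq_assoc,
    bsearch_eq sortedTable c (by decide) sortedTable.length 0 sortedTable.length
      (by omega) (le_refl _) (by omega) (fun i h hle => absurd hle (by omega)),
    assoc_ext _ sortedTable (by decide) (by decide)]
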